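-- pv_equiv track=rewrite | github.com/HanwenXuTHU/BioTranslatorProject | BioTranslator_Fairseq/tasks/protein_utils.py | term_training_numbers
-- ===== SOURCE A (Python) =====
-- import collections
--
-- def term_training_numbers(val_data, train_data):
--     '''
--     This function calculates how many training samples exists in the
--     :param val_data:
--     :param train_data:
--     :return:
--     '''
--     term2number = collections.OrderedDict()
--     for annt_val in list(val_data['annotations']):
--         for a_id in annt_val:
--             term2number[a_id] = 0
--     training_annt = list(train_data['annotations'])
--     for annt in training_annt:
--         annt = list(set(annt))
--         for a_id in annt:
--             if a_id not in term2number.keys():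
--                 continue
--             term2number[a_id] += 1
--     return term2number
-- ===== SOURCE B (Python) =====
-- import collections
--
-- def term_training_numbers(val_data, train_data):
--     training = list(train_data['annotations'])
--     # validation terms in first-appearance order
--     keys = []
--     seen = set()
--     for annt_val in list(val_data['annotations']):
--         for a_id in annt_val:
--             if a_id not in seen:
--                 seen.add(a_id)
--                 keys.append(a_id)
--     # count per term by scanning the training samples directly
--     return collections.OrderedDict(
--         (k, sum(1 for annt in training if k in annt)) for k in keys)
-- ===== Notes on version B (the rewrite author's own statement) =====
-- stated objective: alternative
-- what changed: B never accumulates counts in a dict at all: it first extracts the deduplicated validation-term order with a seen-set, then computes each term's count independently as sum(1 for annt in training if k in annt) — per-term scans over the training list with membership tests replace A's per-sample set-dedup-and-increment updates of a pre-seeded dict.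
import Mathlib
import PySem

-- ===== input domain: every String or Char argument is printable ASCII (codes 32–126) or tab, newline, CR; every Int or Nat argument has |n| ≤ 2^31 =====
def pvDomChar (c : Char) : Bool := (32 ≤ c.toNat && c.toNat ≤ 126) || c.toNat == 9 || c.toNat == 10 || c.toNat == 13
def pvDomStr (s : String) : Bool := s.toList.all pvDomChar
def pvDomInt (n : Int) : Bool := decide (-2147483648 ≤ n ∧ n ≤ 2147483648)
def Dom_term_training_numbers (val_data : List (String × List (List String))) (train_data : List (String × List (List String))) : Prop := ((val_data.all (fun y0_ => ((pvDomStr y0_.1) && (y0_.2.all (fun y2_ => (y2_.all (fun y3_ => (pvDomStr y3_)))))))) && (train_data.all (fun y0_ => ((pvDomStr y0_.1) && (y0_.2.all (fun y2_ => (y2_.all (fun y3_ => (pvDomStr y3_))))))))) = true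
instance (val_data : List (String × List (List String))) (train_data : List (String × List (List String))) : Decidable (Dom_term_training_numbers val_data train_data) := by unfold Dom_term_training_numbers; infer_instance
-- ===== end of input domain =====

-- B keeps no count dict at all: it extracts the deduplicated validation-term order, then counts each term by a direct scan of the training samples (alternative decomposition; same return value).


-- ===== PORT A =====
def term_training_numbers (val_data : List (String × List (List String))) (train_data : List (String × List (List String))) : List (String × Int) :=
  match (PySem.Dict.mk val_data).get? "annotations" with
  | none => []  -- KeyError, excluded by Pre_
  | some val_annts =>
    -- term2number = OrderedDict(); for annt_val in val: for a_id in annt_val: term2number[a_id] = 0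
    let term2number : PySem.Dict String Int :=
      val_annts.foldl (fun d annt_val => annt_val.foldl (fun d a_id => d.insert a_id 0) d) PySem.Dict.empty
    match (PySem.Dict.mk train_data).get? "annotations" with
    | none => []  -- KeyError, excluded by Pre_
    | some training_annt =>
      -- for annt in training_annt: annt = list(set(annt)); for a_id in annt: if present: += 1
      let final :=
        training_annt.foldl (fun d annt =>
          (PySem.Set.ofList annt).foldl (fun d a_id =>
            if d.contains a_id then d.insert a_id (d.getD a_id 0 + 1) else d) d) term2number
      final.items

-- ===== PORT B =====
def term_training_numbers_alt (val_data : List (String × List (List String))) (train_data : List (String × List (List String))) : List (String × Int) :=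
  match (PySem.Dict.mk train_data).get? "annotations" with
  | none => []  -- KeyError, excluded by Pre_
  | some training =>
    match (PySem.Dict.mk val_data).get? "annotations" with
    | none => []  -- KeyError, excluded by Pre_
    | some val_annts =>
      -- keys = []; seen = set(); for annt_val in val: for a_id in annt_val: if a_id not in seen: seen.add(a_id); keys.append(a_id)
      let st : PySem.Set String × List String :=
        val_annts.foldl (fun st annt_val =>
          annt_val.foldl (fun (st : PySem.Set String × List String) a_id =>
            if PySem.Set.contains st.1 a_id then st
            else (PySem.Set.add st.1 a_id, st.2 ++ [a_id])) st) (PySem.Set.empty, [])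
      -- OrderedDict((k, sum(1 for annt in training if k in annt)) for k in keys);
      -- the keys are pairwise distinct by the seen-set guard, so the OrderedDict is exactly this pair list
      st.2.map (fun k =>
        (k, training.foldl (fun acc annt => if k ∈ annt then acc + 1 else acc) (0 : Int)))

-- ===== PRECONDITION & SPEC =====
-- Pre_ excludes exactly the inputs where A raises KeyError: a missing 'annotations' key in either dict.
def Pre_term_training_numbers (val_data : List (String × List (List String))) (train_data : List (String × List (List String))) : Prop :=
  ((PySem.Dict.mk val_data).get? "annotations").isSome ∧ ((PySem.Dict.mk train_data).get? "annotations").isSome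
instance (val_data : List (String × List (List String))) (train_data : List (String × List (List String))) : Decidable (Pre_term_training_numbers val_data train_data) := by unfold Pre_term_training_numbers; infer_instance
def pvWitness_term_training_numbers : (List (String × List (List String))) × (List (String × List (List String))) :=
  ([("annotations", [["a", "b"], ["c"]])], [("annotations", [["a", "c", "a"], ["b"], []])])
def Spec_term_training_numbers (val_data : List (String × List (List String))) (train_data : List (String × List (List String))) (out : List (String × Int)) : Prop := out = term_training_numbers_alt val_data train_data
instance (val_data : List (String × List (List String))) (train_data : List (String × List (List String))) (out : List (String × Int)) : Decidable (Spec_term_training_numbers val_data train_data out) := by unfold Spec_term_training_numbers; infer_instance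

-- ===== CLAIM (what is proved, stated in full; the proofs are below) =====
def Claim_equal_term_training_numbers : Prop := ∀ (val_data : List (String × List (List String))) (train_data : List (String × List (List String))), Dom_term_training_numbers val_data train_data → Pre_term_training_numbers val_data train_data → Spec_term_training_numbers val_data train_data (term_training_numbers val_data train_data)

-- ===== LEMMAS AND PROOFS =====

-- how many training samples contain the term k
def pvCnt (ta : List (List String)) (k : String) : Int :=
  ((ta.countP (fun annt => decide (k ∈ annt))) : Int)

-- one training sample in A's second loop: bump every present key that is in s, entrywise
theorem pvSample_items (s : List String) (hs : s.Nodup) (d : PySem.Dict String Int) (hd : d.keys.Nodup) :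
    (s.foldl (fun d a => if d.contains a then d.insert a (d.getD a 0 + 1) else d) d).items
      = d.items.map (fun kv => (kv.1, kv.2 + if kv.1 ∈ s then (1:Int) else 0)) := by
  induction s generalizing d with
  | nil => simp
  | cons a rest ih =>
    rw [List.foldl_cons]
    rcases List.nodup_cons.1 hs with ⟨hnotin, hrest⟩
    by_cases hc : d.contains a = true
    · rw [if_pos hc]
      have hkeys : (d.insert a (d.getD a 0 + 1)).items = d.items.map (fun p => if p.1 == a then (a, d.getD a 0 + 1) else p) :=
        PySem.Dict.items_insert_of_contains d (d.getD a 0 + 1) hc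
      have hnd : (d.insert a (d.getD a 0 + 1)).keys.Nodup := PySem.Dict.nodup_keys_insert _ _ _ hd
      rw [ih hrest _ hnd, hkeys, List.map_map]
      apply List.map_congr_left
      intro kv hkv
      by_cases hka : kv.1 = a
      · have hval : d.getD a 0 = kv.2 := by
          subst hka
          exact PySem.Dict.getD_of_mem_items d (by simpa using hkv) hd 0
        simp [Function.comp, hka, hval, hnotin]
      · simp [Function.comp, fun h => hka h]
    · rw [if_neg (by simpa using hc)]
      rw [ih hrest _ hd]
      apply List.map_congr_left
      intro kv hkv
      have hka : kv.1 ≠ a := by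
        intro h
        have : d.contains kv.1 = true := by
          rw [PySem.Dict.contains_eq_decide_mem_keys]
          exact decide_eq_true (PySem.Dict.mem_keys_of_mem_items d hkv)
        rw [h] at this; exact absurd this (by simpa using hc)
      simp [hka]

-- A's whole second phase: bump each value by pvCnt, entrywise
theorem pvPhase2_items (ta : List (List String)) (d : PySem.Dict String Int) (hd : d.keys.Nodup) :
    (ta.foldl (fun d annt =>
        (PySem.Set.ofList annt).foldl (fun d a => if d.contains a then d.insert a (d.getD a 0 + 1) else d) d) d).items
      = d.items.map (fun kv => (kv.1, kv.2 + pvCnt ta kv.1)) := by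
  induction ta generalizing d with
  | nil => simp [pvCnt]
  | cons annt rest ih =>
    rw [List.foldl_cons]
    set d' := (PySem.Set.ofList annt).foldl (fun d a => if d.contains a then d.insert a (d.getD a 0 + 1) else d) d with hd'
    have hitems : d'.items = d.items.map (fun kv => (kv.1, kv.2 + if kv.1 ∈ annt then (1:Int) else 0)) := by
      rw [hd', pvSample_items _ (PySem.Set.nodup_ofList annt) _ hd]
      apply List.map_congr_left; intro kv _
      simp [PySem.Set.mem_ofList]
    have hkeys : d'.keys.Nodup := by
      show (d'.items.map Prod.fst).Nodup
      rw [hitems, List.map_map]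
      have : (Prod.fst ∘ fun kv : String × Int => (kv.1, kv.2 + if kv.1 ∈ annt then (1:Int) else 0)) = Prod.fst := by
        funext kv; rfl
      rw [this]; exact hd
    rw [ih _ hkeys, hitems, List.map_map]
    apply List.map_congr_left
    intro kv _
    simp only [Function.comp, pvCnt, List.countP_cons]
    by_cases hk : kv.1 ∈ annt
    · simp [hk]; ring
    · simp [hk]

-- joint invariant of A's zero-seeding loop and B's seen/keys dedup loop, over the same term stream:
-- the dict's items are exactly the collected keys paired with 0, and 'seen' tests the same membership as the dict.
theorem pvDedup_inv (l : List String) (d : PySem.Dict String Int) (seen : PySem.Set String) (acc : List String)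
    (h1 : d.items = acc.map (fun k => (k, (0:Int))))
    (h2 : ∀ a, PySem.Set.contains seen a = d.contains a) :
    (l.foldl (fun d a => d.insert a 0) d).items
      = (l.foldl (fun (st : PySem.Set String × List String) a =>
          if PySem.Set.contains st.1 a then st else (PySem.Set.add st.1 a, st.2 ++ [a])) (seen, acc)).2.map
        (fun k => (k, (0:Int)))
   ∧ ∀ a, PySem.Set.contains
        (l.foldl (fun (st : PySem.Set String × List String) a =>
          if PySem.Set.contains st.1 a then st else (PySem.Set.add st.1 a, st.2 ++ [a])) (seen, acc)).1 a
      = (l.foldl (fun d a => d.insert a 0) d).contains a := by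
  induction l generalizing d seen acc with
  | nil => exact ⟨h1, fun a => (h2 a)⟩
  | cons x rest ih =>
    rw [List.foldl_cons, List.foldl_cons]
    by_cases hx : PySem.Set.contains seen x = true
    · have hcd : d.contains x = true := by rw [← h2]; exact hx
      rw [if_pos hx]
      apply ih
      · rw [PySem.Dict.items_insert_of_contains d 0 hcd, h1, List.map_map]
        apply List.map_congr_left
        intro k _
        by_cases hk : (k == x) = true
        · have : k = x := eq_of_beq hk
          simp [this]
        · have hkx : k ≠ x := fun h => hk (by simp [h])
          simp [hkx]
      · intro a
        rw [h2, PySem.Dict.contains_insert]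
        by_cases ha : (a == x) = true
        · have : a = x := eq_of_beq ha
          simp [this, hcd]
        · simp [ha]
    · have hcd : d.contains x = false := by rw [← h2]; simpa using hx
      rw [if_neg (by simpa using hx)]
      apply ih
      · rw [PySem.Dict.items_insert_of_not_contains d 0 hcd, h1, List.map_append]
        rfl
      · intro a
        rw [PySem.Dict.contains_insert]
        have hca : PySem.Set.contains (PySem.Set.add seen x) a
            = decide (a ∈ seen ∨ a = x) := by
          by_cases hm : a ∈ seen ∨ a = x
          · rw [(PySem.Set.contains_iff _ a).2 ((PySem.Set.mem_add seen x a).2 hm), decide_eq_true hm]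
          · have h1' : PySem.Set.contains (PySem.Set.add seen x) a = false := by
              by_contra h
              exact hm ((PySem.Set.mem_add seen x a).1 ((PySem.Set.contains_iff _ a).1 ((Bool.not_eq_false _).mp h)))
            rw [h1', decide_eq_false hm]
        rw [hca]
        by_cases ha : (a == x) = true
        · have hax : a = x := eq_of_beq ha
          subst hax
          simp
        · have hax : a ≠ x := fun h => ha (by simp [h])
          have hs : PySem.Set.contains seen a = decide (a ∈ seen) := by
            by_cases hm : a ∈ seen
            · rw [(PySem.Set.contains_iff _ a).2 hm, decide_eq_true hm]
            · have : PySem.Set.contains seen a = false := by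
                by_contra h
                exact hm ((PySem.Set.contains_iff _ a).1 ((Bool.not_eq_false _).mp h))
              rw [this, eq_comm, decide_eq_false_iff_not]; exact hm
          rw [← h2, hs]
          simp [ha, hax]

-- B's per-term counting fold is pvCnt
theorem pvCount_fold (ta : List (List String)) (k : String) :
    ta.foldl (fun acc annt => if k ∈ annt then acc + 1 else acc) (0 : Int) = pvCnt ta k := by
  rw [PySem.List.foldl_ite_add_one]
  simp [pvCnt]

-- ===== VERDICT (by name: the statement is the Claim_ definition above) =====
theorem term_training_numbers_spec : Claim_equal_term_training_numbers := by
  intro val_data train_data _ hpre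
  obtain ⟨hv, ht⟩ := hpre
  obtain ⟨va, hva⟩ := Option.isSome_iff_exists.1 hv
  obtain ⟨ta, hta⟩ := Option.isSome_iff_exists.1 ht
  show term_training_numbers val_data train_data = term_training_numbers_alt val_data train_data
  unfold term_training_numbers term_training_numbers_alt
  rw [hva, hta]
  simp only
  -- flatten both nested loops to folds over va.flatten
  have hflatA : (va.foldl (fun d annt_val => annt_val.foldl (fun d a_id => d.insert a_id 0) d) (PySem.Dict.empty : PySem.Dict String Int))
      = va.flatten.foldl (fun d a_id => d.insert a_id 0) (PySem.Dict.empty : PySem.Dict String Int) := by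
    rw [List.foldl_flatten]
  have hflatB : (va.foldl (fun st annt_val =>
        annt_val.foldl (fun (st : PySem.Set String × List String) a_id =>
          if PySem.Set.contains st.1 a_id then st
          else (PySem.Set.add st.1 a_id, st.2 ++ [a_id])) st) (PySem.Set.empty, []))
      = va.flatten.foldl (fun (st : PySem.Set String × List String) a_id =>
          if PySem.Set.contains st.1 a_id then st
          else (PySem.Set.add st.1 a_id, st.2 ++ [a_id])) (PySem.Set.empty, []) := by
    rw [List.foldl_flatten]
  rw [hflatA, hflatB]
  obtain ⟨hitems0, _⟩ := pvDedup_inv va.flatten (PySem.Dict.empty : PySem.Dict String Int) PySem.Set.empty []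
    (by simp [PySem.Dict.empty]) (by intro a; simp [PySem.Set.empty, PySem.Set.contains, PySem.Dict.contains_empty])
  have hnd : (va.flatten.foldl (fun d a_id => d.insert a_id 0) (PySem.Dict.empty : PySem.Dict String Int)).keys.Nodup :=
    PySem.Dict.nodup_keys_foldl_insert _ _ _ PySem.Dict.nodup_keys_empty
  rw [pvPhase2_items ta _ hnd, hitems0, List.map_map]
  apply List.map_congr_left
  intro k _
  simp [Function.comp, pvCount_fold]
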